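-- pv_equiv track=rewrite | github.com/Faccococo/CS303_AI | Project2/CARP/utils.py | find_minimal
-- ===== SOURCE A (Python) =====
-- INT_MAX = 1000000000
--
-- def find_minimal(init_pos, demand_edges, distance):
--     """
--     return a list, which contain edges in demand_edges that have minimal distance to init_pos
--     """
--     min_dis = INT_MAX
--     min_edge = []
--
--     for edge in demand_edges:
--         start_pos = edge[0]
--         if distance[init_pos, start_pos] < min_dis:
--             min_dis = distance[init_pos, start_pos]
--
--     for edge in demand_edges:
--         if distance[init_pos, edge[0]] == min_dis:
--             min_edge.append(edge)
--
--     return min_edge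
-- ===== SOURCE B (Python) =====
-- INT_MAX = 1000000000
--
-- def find_minimal(init_pos, demand_edges, distance):
--     min_dis = INT_MAX
--     min_edge = []
--     for edge in demand_edges:
--         d = distance[init_pos, edge[0]]
--         if d < min_dis:
--             min_dis = d
--             min_edge = [edge]
--         elif d == min_dis:
--             min_edge.append(edge)
--     return min_edge
-- ===== Notes on version B (the rewrite author's own statement) =====
-- stated objective: faster
-- what changed: Fused the two sequential passes (min-finding pass, then filtering pass) into one pass that threads the running minimum and resets/extends the accumulator, halving the dict lookups.
import Mathlib
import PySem

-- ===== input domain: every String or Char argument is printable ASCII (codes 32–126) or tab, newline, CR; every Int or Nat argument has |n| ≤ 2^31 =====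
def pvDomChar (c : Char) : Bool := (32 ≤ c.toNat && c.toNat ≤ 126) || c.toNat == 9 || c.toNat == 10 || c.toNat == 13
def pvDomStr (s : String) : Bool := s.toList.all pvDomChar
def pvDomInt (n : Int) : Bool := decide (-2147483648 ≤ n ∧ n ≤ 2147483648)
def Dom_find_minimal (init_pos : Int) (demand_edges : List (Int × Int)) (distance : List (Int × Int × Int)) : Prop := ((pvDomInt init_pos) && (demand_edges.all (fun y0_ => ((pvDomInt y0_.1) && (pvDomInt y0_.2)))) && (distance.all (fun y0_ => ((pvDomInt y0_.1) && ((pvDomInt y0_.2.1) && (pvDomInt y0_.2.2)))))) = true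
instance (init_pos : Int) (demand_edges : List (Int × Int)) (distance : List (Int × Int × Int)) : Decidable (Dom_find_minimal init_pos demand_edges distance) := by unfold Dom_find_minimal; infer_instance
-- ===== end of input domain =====

-- B fuses A's two sequential passes over demand_edges into a single pass threading the
-- running minimum and the accumulator (reset on strictly smaller, append on equal),
-- halving the dict lookups (objective: faster, constant factor).

-- ===== PORT A =====
-- dict lookup distance[(a, b)]: first matching key, as an Option (none = KeyError)
def pvDistGet (distance : List (Int × Int × Int)) (a b : Int) : Option Int :=
  (distance.find? (fun t => t.1 == a && t.2.1 == b)).map (fun t => t.2.2)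

-- exact on Pre_ (every needed key present); default 0 is never reached there
def pvDistGetD (distance : List (Int × Int × Int)) (a b : Int) : Int :=
  (pvDistGet distance a b).getD 0

def find_minimal (init_pos : Int) (demand_edges : List (Int × Int)) (distance : List (Int × Int × Int)) : List (Int × Int) :=
  let min_dis := demand_edges.foldl
    (fun min_dis edge =>
      let start_pos := edge.1
      if pvDistGetD distance init_pos start_pos < min_dis then
        pvDistGetD distance init_pos start_pos
      else min_dis)
    1000000000
  demand_edges.foldl
    (fun min_edge edge =>
      if pvDistGetD distance init_pos edge.1 = min_dis then min_edge ++ [edge]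
      else min_edge)
    []

-- ===== PORT B =====
def find_minimal_alt (init_pos : Int) (demand_edges : List (Int × Int)) (distance : List (Int × Int × Int)) : List (Int × Int) :=
  (demand_edges.foldl
    (fun st edge =>
      let d := pvDistGetD distance init_pos edge.1
      if d < st.1 then (d, [edge])
      else if d = st.1 then (st.1, st.2 ++ [edge])
      else st)
    ((1000000000 : Int), ([] : List (Int × Int)))).2

-- ===== PRECONDITION & SPEC =====
-- Pre_ excludes exactly the inputs where Python A raises KeyError: some demand edge whose
-- key (init_pos, edge[0]) is absent from the distance dict.
def Pre_find_minimal (init_pos : Int) (demand_edges : List (Int × Int)) (distance : List (Int × Int × Int)) : Prop :=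
  ∀ edge ∈ demand_edges, ∃ t ∈ distance, t.1 = init_pos ∧ t.2.1 = edge.1
instance (init_pos : Int) (demand_edges : List (Int × Int)) (distance : List (Int × Int × Int)) : Decidable (Pre_find_minimal init_pos demand_edges distance) := by unfold Pre_find_minimal; infer_instance
def pvWitness_find_minimal : Int × (List (Int × Int)) × (List (Int × Int × Int)) :=
  (1, [(2, 3), (4, 5)], [(1, 2, 7), (1, 4, 7)])
def Spec_find_minimal (init_pos : Int) (demand_edges : List (Int × Int)) (distance : List (Int × Int × Int)) (out : List (Int × Int)) : Prop := out = find_minimal_alt init_pos demand_edges distance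
instance (init_pos : Int) (demand_edges : List (Int × Int)) (distance : List (Int × Int × Int)) (out : List (Int × Int)) : Decidable (Spec_find_minimal init_pos demand_edges distance out) := by unfold Spec_find_minimal; infer_instance

-- ===== CLAIM (what is proved, stated in full; the proofs are below) =====
def Claim_equal_find_minimal : Prop := ∀ (init_pos : Int) (demand_edges : List (Int × Int)) (distance : List (Int × Int × Int)), Dom_find_minimal init_pos demand_edges distance → Pre_find_minimal init_pos demand_edges distance → Spec_find_minimal init_pos demand_edges distance (find_minimal init_pos demand_edges distance)

-- ===== LEMMAS AND PROOFS =====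

-- A's first pass, abstracted over the starting floor m
def pvMinA (d : (Int × Int) → Int) (l : List (Int × Int)) (m : Int) : Int :=
  l.foldl (fun m e => if d e < m then d e else m) m

theorem pvMinA_le (d : (Int × Int) → Int) (l : List (Int × Int)) (m : Int) :
    pvMinA d l m ≤ m := by
  induction l generalizing m with
  | nil => simp [pvMinA]
  | cons e t ih =>
    simp only [pvMinA, List.foldl_cons]
    split_ifs with h
    · exact le_trans (ih (d e)) (le_of_lt h)
    · exact ih m

-- B's fold in terms of A's min and a filter
theorem pvFoldB_eq (d : (Int × Int) → Int) (l : List (Int × Int)) (m : Int) (acc : List (Int × Int)) :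
    l.foldl (fun st e => if d e < st.1 then (d e, [e])
                         else if d e = st.1 then (st.1, st.2 ++ [e]) else st) (m, acc)
      = (pvMinA d l m,
         (if pvMinA d l m = m then acc else []) ++ l.filter (fun e => d e = pvMinA d l m)) := by
  induction l generalizing m acc with
  | nil => simp [pvMinA]
  | cons e t ih =>
    have hcons : pvMinA d (e :: t) m = pvMinA d t (if d e < m then d e else m) := by
      simp [pvMinA]
    rw [List.foldl_cons, hcons]
    by_cases h1 : d e < m
    · rw [if_pos h1, if_pos h1, ih, List.filter_cons]
      have hM := pvMinA_le d t (d e)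
      have h3 : ¬ pvMinA d t (d e) = m := by omega
      by_cases h2 : d e = pvMinA d t (d e)
      · have h5 : ¬ d e = m := by omega
        simp [h3, ← h2, h5]
      · have h4 : ¬ pvMinA d t (d e) = d e := fun h => h2 h.symm
        simp [h3, h2, h4]
    · rw [if_neg h1, if_neg h1, List.filter_cons]
      by_cases h2 : d e = m
      · rw [if_pos h2, ih]
        by_cases h3 : pvMinA d t m = m
        · have h4 : d e = pvMinA d t m := by omega
          simp [h3, h4]
        · have h4 : ¬ d e = pvMinA d t m := by
            intro h; exact h3 (by omega)
          simp [h3, h4]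
      · rw [if_neg h2, ih]
        have hM := pvMinA_le d t m
        have h4 : ¬ d e = pvMinA d t m := by omega
        simp [h4]

-- A's second pass is a filter
theorem pvFoldFilter (d : (Int × Int) → Int) (l : List (Int × Int)) (M : Int) (acc : List (Int × Int)) :
    l.foldl (fun min_edge e => if d e = M then min_edge ++ [e] else min_edge) acc
      = acc ++ l.filter (fun e => d e = M) := by
  induction l generalizing acc with
  | nil => simp
  | cons e t ih =>
    simp only [List.foldl_cons, List.filter_cons]
    by_cases h : d e = M
    · simp [h, ih, List.append_assoc]
    · simp [h, ih]

-- ===== VERDICT (by name: the statement is the Claim_ definition above) =====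
theorem find_minimal_spec : Claim_equal_find_minimal := by
  intro init_pos demand_edges distance _ _
  unfold Spec_find_minimal find_minimal find_minimal_alt
  set d := fun e : Int × Int => pvDistGetD distance init_pos e.1 with hd
  have hB := pvFoldB_eq d demand_edges 1000000000 []
  have hA := pvFoldFilter d demand_edges (pvMinA d demand_edges 1000000000) []
  simp only [pvMinA] at hA hB
  simp only [hd] at hA hB ⊢
  rw [hB, hA]
  simp
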